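-- pv_equiv track=rewrite | github.com/amadeusdotpng/aoc | y23/d14.py | getLoadMap
-- ===== SOURCE A (Python) =====
-- def getLoadMap(map: str):
--     map = map.splitlines()
--     sum= 0
--     for i in range(len(map[0])):
--         col = ''
--         for row in map:
--             col += row[i]
--         sum += getLoadCol(col[::-1])
--     return sum
--
-- def getLoadCol(col: str) -> int:
--     return sum(i+1 for i,c in enumerate(col) if c == 'O')
-- ===== SOURCE B (Python) =====
-- def getLoadMap(map: str):
--     rows = map.splitlines()
--     n = len(rows)
--     return sum(row.count('O') * (n - r) for r, row in enumerate(rows))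
-- ===== Notes on version B (the rewrite author's own statement) =====
-- stated objective: faster
-- what changed: A builds every column as a fresh string (quadratic string concatenation per column) and scores each reversed column; B makes one pass over the rows, adding the row's rock count times (numRows - r) for each row r.
-- intended difference: On maps where some line extends beyond the first line's width and carries a rock (the letter O) there, A silently ignores those trailing characters (it only scans columns up to the first line's width) and undercounts the load, while B counts every rock in the map; counting the whole map is the intended load (at the witness A returns 3, B returns 4). — e.g. on getLoadMap("O\nOO"): A returns 3, B returns 4
import Mathlib
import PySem

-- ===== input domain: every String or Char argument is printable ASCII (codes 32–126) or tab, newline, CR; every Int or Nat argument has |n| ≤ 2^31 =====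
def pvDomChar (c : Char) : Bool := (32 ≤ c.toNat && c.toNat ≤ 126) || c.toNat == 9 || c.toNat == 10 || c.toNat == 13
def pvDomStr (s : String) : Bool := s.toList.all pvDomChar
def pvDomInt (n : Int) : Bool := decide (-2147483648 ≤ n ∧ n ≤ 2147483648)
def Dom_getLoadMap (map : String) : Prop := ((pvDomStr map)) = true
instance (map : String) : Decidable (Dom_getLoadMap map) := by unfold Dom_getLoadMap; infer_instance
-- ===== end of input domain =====

-- B replaces A's column-by-column O(C·R²) string building with one pass over the rows,
-- adding each row's rock count times (numRows - r), for row index r (asymptotically faster).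

-- ===== PORT A =====
-- helper getLoadCol, on code points: sum(i+1 for i,c in enumerate(col) if c is a rock)
def getLoadCol (col : List Char) : Int :=
  (((PySem.List.enumerate col).filter (fun p => p.2 == 'O')).map (fun p => p.1 + 1)).sum

def getLoadMap (map : String) : Int :=
  let rows := (PySem.Str.splitlines map).map String.toList
  match PySem.List.pyGet? rows 0 with
  | none => 0  -- map[0] raises IndexError in Python here; Pre_ excludes this
  | some row0 =>
    (PySem.List.pyRange 0 (row0.length : Int)).foldl
      (fun sum i =>
        -- col += row[i]; row[i] raises IndexError when out of range (Pre_ excludes that)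
        let col := rows.foldl
          (fun col row => col ++ ((PySem.List.pyGet? row i).elim [] (fun ch => [ch]))) []
        -- col[::-1] is List.reverse (PySem.List.slice?_none_none_neg_one)
        sum + getLoadCol col.reverse) 0

-- ===== PORT B =====
def getLoadMap_alt (map : String) : Int :=
  let rows := PySem.Str.splitlines map
  let n : Int := rows.length
  ((PySem.List.enumerate rows).map
    (fun p => (PySem.Str.count p.2 "O" : Int) * (n - p.1))).sum

-- ===== PRECONDITION & SPEC =====
-- Pre_ excludes exactly the inputs where A raises IndexError: the empty string
-- (splitlines is empty, so map[0] raises) and maps in which some line is shorter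
-- than the first line (row[i] raises).
def Pre_getLoadMap (map : String) : Prop :=
  (PySem.Str.splitlines map).map String.toList ≠ [] ∧
  ∀ r ∈ (PySem.Str.splitlines map).map String.toList,
    (((PySem.Str.splitlines map).map String.toList).headD []).length ≤ r.length
instance (map : String) : Decidable (Pre_getLoadMap map) := by unfold Pre_getLoadMap; infer_instance

def pvWitness_getLoadMap : String := ".O#\nO.O"

-- On maps whose lines extend beyond the first line's width and carry a rock there,
-- A silently ignores those characters (it only scans columns up to the first line's width)
-- and undercounts, while B counts every rock in the map; B's total is the intended load.
def D_getLoadMap (map : String) : Prop :=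
  ∃ r ∈ (PySem.Str.splitlines map).map String.toList,
    'O' ∈ r.drop (((PySem.Str.splitlines map).map String.toList).headD []).length
instance (map : String) : Decidable (D_getLoadMap map) := by unfold D_getLoadMap; infer_instance

def Spec_getLoadMap (map : String) (out : Int) : Prop := ¬ D_getLoadMap map → out = getLoadMap_alt map
instance (map : String) (out : Int) : Decidable (Spec_getLoadMap map out) := by unfold Spec_getLoadMap; infer_instance

def pvDiffWitness_getLoadMap : String := "O\nOO"
def pvDiffWitnessOut_getLoadMap : Int × Int := (3, 4)

-- ===== CLAIM (what is proved, stated in full; the proofs are below) =====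
def Claim_unchanged_getLoadMap : Prop := ∀ (map : String), Dom_getLoadMap map → Pre_getLoadMap map → Spec_getLoadMap map (getLoadMap map)
def Claim_changed_getLoadMap : Prop := Dom_getLoadMap (pvDiffWitness_getLoadMap) ∧ Pre_getLoadMap (pvDiffWitness_getLoadMap) ∧ D_getLoadMap (pvDiffWitness_getLoadMap) ∧ getLoadMap (pvDiffWitness_getLoadMap) = pvDiffWitnessOut_getLoadMap.1 ∧ getLoadMap_alt (pvDiffWitness_getLoadMap) = pvDiffWitnessOut_getLoadMap.2 ∧ pvDiffWitnessOut_getLoadMap.1 ≠ pvDiffWitnessOut_getLoadMap.2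
def Claim_exact_getLoadMap : Prop := ∀ (map : String), Dom_getLoadMap map → Pre_getLoadMap map → D_getLoadMap map → getLoadMap map ≠ getLoadMap_alt map

-- ===== LEMMAS AND PROOFS =====

-- Chars.count with a one-character needle is List.count
theorem pvCountGo_singleton (c : Char) : ∀ (fuel : Nat) (s : List Char) (acc : Nat),
    s.length ≤ fuel → PySem.Chars.count.go [c] fuel s acc = acc + s.count c := by
  intro fuel
  induction fuel with
  | zero =>
    intro s acc h
    have : s = [] := List.length_eq_zero_iff.mp (Nat.le_zero.mp h)
    subst this; simp [PySem.Chars.count.go]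
  | succ f ih =>
    intro s acc h
    cases s with
    | nil => simp [PySem.Chars.count.go]
    | cons x t =>
      simp only [PySem.Chars.count.go]
      by_cases hx : c = x
      · subst hx
        have hp : [c].isPrefixOf (c :: t) = true := by simp [List.isPrefixOf]
        simp only [hp, if_true, List.length_cons, List.drop_succ_cons, List.length_nil,
          List.drop_zero]
        rw [ih t (acc + 1) (by simpa using h)]
        simp; omega
      · have hx' : ¬ x = c := fun hh => hx hh.symm
        have hp : [c].isPrefixOf (x :: t) = false := by
          simp [List.isPrefixOf, hx]
        simp only [hp, Bool.false_eq_true, if_false]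
        rw [ih t acc (by simpa using h)]
        simp [hx']

theorem pvCount_singleton (l : List Char) (c : Char) :
    PySem.Chars.count l [c] = l.count c := by
  unfold PySem.Chars.count
  simp only [List.isEmpty_cons, Bool.false_eq_true, if_false]
  simpa using pvCountGo_singleton c l.length l 0 le_rfl

-- sum over enumerate as a Finset.range sum
theorem pvSum_enumerate {α : Type} (f : Int → α → Int) (d : α) :
    ∀ (l : List α) (s : Int),
      ((PySem.List.enumerate l s).map (fun p => f p.1 p.2)).sum
        = ∑ r ∈ Finset.range l.length, f (s + r) (l.getD r d) := by
  intro l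
  induction l with
  | nil => intro s; simp [PySem.List.enumerate_nil]
  | cons x xs ih =>
    intro s
    rw [PySem.List.enumerate_cons]
    simp only [List.map_cons, List.sum_cons, List.length_cons]
    rw [Finset.sum_range_succ']
    rw [ih (s + 1)]
    simp only [List.getD_cons_succ, List.getD_cons_zero]
    have hterm : ∀ r : Nat, s + ((r + 1 : Nat) : Int) = s + 1 + (r : Int) := by
      intro r; push_cast; ring
    simp only [hterm, Nat.cast_zero, add_zero]
    ring

-- List.count as a 0/1 Finset.range sum (Int-valued)
theorem pvCount_eq_sum (l : List Char) (c d : Char) :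
    (l.count c : Int) = ∑ j ∈ Finset.range l.length, (if l.getD j d = c then (1:Int) else 0) := by
  induction l with
  | nil => simp
  | cons x xs ih =>
    simp only [List.length_cons]
    rw [Finset.sum_range_succ']
    simp only [List.getD_cons_succ, List.getD_cons_zero, List.count_cons]
    rw [← ih]
    by_cases hx : x = c <;> simp [hx]

-- the inner column-building fold of A
theorem pvColFold (j : Nat) :
    ∀ (l : List (List Char)) (acc : List Char), (∀ r ∈ l, j < r.length) →
      l.foldl (fun col row => col ++ ((PySem.List.pyGet? row (j : Int)).elim [] (fun ch => [ch]))) acc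
        = acc ++ l.map (fun r => r.getD j ' ') := by
  intro l
  induction l with
  | nil => intro acc _; simp
  | cons x xs ih =>
    intro acc h
    have hx : j < x.length := h x (by simp)
    simp only [List.foldl_cons]
    rw [ih _ (fun r hr => h r (by simp [hr]))]
    rw [PySem.List.pyGet?_natCast]
    simp [List.getD_eq_getElem?_getD, List.getElem?_eq_getElem hx]

-- getLoadCol of a reversed column
theorem pvGetLoadCol_eq (l : List Char) (s : Int) :
    (((PySem.List.enumerate l s).filter (fun p => p.2 == 'O')).map (fun p => p.1 + 1)).sum
      = ((PySem.List.enumerate l s).map (fun p => if p.2 = 'O' then p.1 + 1 else 0)).sum := by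
  induction l generalizing s with
  | nil => simp [PySem.List.enumerate_nil]
  | cons x xs ih =>
    rw [PySem.List.enumerate_cons]
    by_cases hx : x = 'O' <;> simp [hx, ih]

theorem pvLoadRev (l : List Char) :
    getLoadCol l.reverse
      = ∑ r ∈ Finset.range l.length, (if l.getD r ' ' = 'O' then ((l.length : Int) - r) else 0) := by
  unfold getLoadCol
  rw [pvGetLoadCol_eq]
  rw [pvSum_enumerate (fun i c => if c = 'O' then i + 1 else 0) ' ' l.reverse 0]
  rw [List.length_reverse]
  rw [← Finset.sum_range_reflect]
  apply Finset.sum_congr rfl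
  intro r hr
  have hr' : r < l.length := Finset.mem_range.mp hr
  have h1 : l.length - 1 - r < l.length := by omega
  have h2 : l.reverse.getD (l.length - 1 - r) ' ' = l.getD r ' ' := by
    rw [List.getD_eq_getElem _ _ (by simpa using h1), List.getD_eq_getElem _ _ hr']
    rw [List.getElem_reverse]
    congr 1
    omega
  rw [h2]
  by_cases ho : l.getD r ' ' = 'O'
  · rw [if_pos ho, if_pos ho]; omega
  · rw [if_neg ho, if_neg ho]

-- ((List.range n).map f).sum is the Finset.range sum (definitional)
theorem pvSum_listRange (f : Nat → Int) (n : Nat) :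
    ((List.range n).map f).sum = ∑ i ∈ Finset.range n, f i := rfl

-- the rock count among the first w entries of a row, as a 0/1 sum
theorem pvRowCountTake (row : List Char) (w : Nat) (hw : w ≤ row.length) :
    ((row.take w).count 'O' : Int)
      = ∑ j ∈ Finset.range w, (if row.getD j ' ' = 'O' then (1:Int) else 0) := by
  rw [pvCount_eq_sum (row.take w) 'O' ' ']
  rw [List.length_take, Nat.min_eq_left hw]
  apply Finset.sum_congr rfl
  intro j hj
  have hj' : j < w := Finset.mem_range.mp hj
  have h1 : j < (row.take w).length := by rw [List.length_take]; omega
  have h2 : j < row.length := by omega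
  rw [List.getD_eq_getElem _ _ h1, List.getD_eq_getElem _ _ h2, List.getElem_take]

-- A scores, column by column, exactly the rocks of each row's first-line-width prefix
theorem pvCharA (map : String) (hpre : Pre_getLoadMap map) :
    getLoadMap map
      = ∑ r ∈ Finset.range ((PySem.Str.splitlines map).map String.toList).length,
          (((((PySem.Str.splitlines map).map String.toList).getD r []).take
              (((PySem.Str.splitlines map).map String.toList).headD []).length).count 'O' : Int)
            * ((((PySem.Str.splitlines map).map String.toList).length : Int) - r) := by
  obtain ⟨hne, hlen⟩ := hpre
  set rows := PySem.Str.splitlines map with hrows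
  set rowsL := rows.map String.toList with hrowsL
  obtain ⟨row0, rest, hcons⟩ : ∃ a l, rowsL = a :: l := by
    cases h : rowsL with
    | nil => exact absurd h hne
    | cons a l => exact ⟨a, l, rfl⟩
  set w := row0.length with hw
  set n := rowsL.length with hn
  have hlen' : ∀ r ∈ rowsL, w ≤ r.length := by
    intro r hr; have := hlen r hr; rwa [hcons] at this
  have hget : PySem.List.pyGet? rowsL 0 = some row0 := by
    simp [hcons]
  have hA : getLoadMap map
      = ∑ j ∈ Finset.range w, ∑ r ∈ Finset.range n,
          (if (rowsL.getD r []).getD j ' ' = 'O' then ((n : Int) - r) else 0) := by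
    simp only [getLoadMap]
    rw [← hrows, ← hrowsL]
    simp only [hget]
    rw [← hw, PySem.List.pyRange_zero_natCast w, List.foldl_map, PySem.List.foldl_add, zero_add,
      pvSum_listRange]
    apply Finset.sum_congr rfl
    intro j hj
    have hj' : j < w := Finset.mem_range.mp hj
    rw [pvColFold j rowsL [] (fun r hr => lt_of_lt_of_le hj' (hlen' r hr)), List.nil_append]
    rw [pvLoadRev]
    rw [List.length_map, ← hn]
    apply Finset.sum_congr rfl
    intro r hr
    have hrl : r < rowsL.length := by have := Finset.mem_range.mp hr; omega
    rw [List.getD_eq_getElem _ _ (by rw [List.length_map]; omega), List.getElem_map,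
      List.getD_eq_getElem _ _ hrl]
  rw [hA, Finset.sum_comm]
  have hhead : rowsL.headD [] = row0 := by rw [hcons]; rfl
  rw [hhead, ← hw]
  apply Finset.sum_congr rfl
  intro r hr
  have hr' : r < n := Finset.mem_range.mp hr
  have hrl : r < rowsL.length := by omega
  have hmem : rowsL.getD r [] ∈ rowsL := by
    rw [List.getD_eq_getElem _ _ hrl]; exact List.getElem_mem hrl
  rw [pvRowCountTake _ w (hlen' _ hmem), Finset.sum_mul]
  apply Finset.sum_congr rfl
  intro j hj
  by_cases ho : (rowsL.getD r []).getD j ' ' = 'O'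
  · rw [if_pos ho, if_pos ho, one_mul]
  · rw [if_neg ho, if_neg ho, zero_mul]

-- B scores every rock of every row
theorem pvCharB (map : String) :
    getLoadMap_alt map
      = ∑ r ∈ Finset.range ((PySem.Str.splitlines map).map String.toList).length,
          ((((PySem.Str.splitlines map).map String.toList).getD r []).count 'O' : Int)
            * ((((PySem.Str.splitlines map).map String.toList).length : Int) - r) := by
  set rows := PySem.Str.splitlines map with hrows
  set rowsL := rows.map String.toList with hrowsL
  have hB : getLoadMap_alt map
      = ∑ r ∈ Finset.range rows.length,
          (PySem.Str.count (rows.getD r "") "O" : Int) * ((rows.length : Int) - ((0:Int) + r)) := by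
    simp only [getLoadMap_alt]
    rw [← hrows]
    exact pvSum_enumerate (fun i s => (PySem.Str.count s "O" : Int) * ((rows.length : Int) - i)) "" rows 0
  rw [hB]
  have hlm : rowsL.length = rows.length := by rw [hrowsL, List.length_map]
  rw [hlm]
  apply Finset.sum_congr rfl
  intro r hr
  have hrs : r < rows.length := Finset.mem_range.mp hr
  have hrl : r < rowsL.length := by omega
  have hrow : (rows.getD r "").toList = rowsL.getD r [] := by
    rw [List.getD_eq_getElem _ _ hrs, List.getD_eq_getElem _ _ hrl]
    exact (List.getElem_map String.toList).symm
  rw [PySem.Str.count_eq]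
  have hO : "O".toList = ['O'] := rfl
  rw [hO, pvCount_singleton, hrow, zero_add]

-- ===== VERDICT (by name: the statement is the Claim_ definition above) =====
theorem getLoadMap_spec : Claim_unchanged_getLoadMap := by
  intro map _ hpre hnd
  unfold D_getLoadMap at hnd
  rw [pvCharA map hpre, pvCharB map]
  apply Finset.sum_congr rfl
  intro r hr
  have hrl : r < ((PySem.Str.splitlines map).map String.toList).length := Finset.mem_range.mp hr
  set rowsL := (PySem.Str.splitlines map).map String.toList
  set w := (rowsL.headD []).length
  set row := rowsL.getD r []
  have hmem : row ∈ rowsL := by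
    rw [show row = rowsL[r] from List.getD_eq_getElem _ _ hrl]; exact List.getElem_mem hrl
  have hno : 'O' ∉ row.drop w := fun h => hnd ⟨row, hmem, h⟩
  congr 1
  rw [show row.count 'O' = (row.take w ++ row.drop w).count 'O' by rw [List.take_append_drop]]
  rw [List.count_append, List.count_eq_zero.mpr hno, Nat.add_zero]

theorem getLoadMap_changed : Claim_changed_getLoadMap := by
  unfold Claim_changed_getLoadMap; decide

theorem getLoadMap_tight : Claim_exact_getLoadMap := by
  intro map _ hpre hd
  unfold D_getLoadMap at hd
  rw [pvCharA map hpre, pvCharB map]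
  apply ne_of_lt
  set rowsL := (PySem.Str.splitlines map).map String.toList with hrowsL
  set w := (rowsL.headD []).length with hwdef
  apply Finset.sum_lt_sum
  · intro r hr
    have hrl : r < rowsL.length := Finset.mem_range.mp hr
    apply mul_le_mul_of_nonneg_right
    · exact_mod_cast (List.take_sublist w _).count_le 'O'
    · have : (r : Int) < (rowsL.length : Int) := by exact_mod_cast hrl
      omega
  · obtain ⟨row, hmem, hOin⟩ := hd
    obtain ⟨r0, hr0, hEq⟩ := List.mem_iff_getElem.mp hmem
    refine ⟨r0, Finset.mem_range.mpr hr0, ?_⟩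
    have hrow : rowsL.getD r0 [] = row := by rw [List.getD_eq_getElem _ _ hr0, hEq]
    rw [hrow]
    apply mul_lt_mul_of_pos_right
    · have hsplit : row.count 'O' = (row.take w).count 'O' + (row.drop w).count 'O' := by
        conv_lhs => rw [← List.take_append_drop w row]
        rw [List.count_append]
      have hpos : 0 < (row.drop w).count 'O' := List.count_pos_iff.mpr hOin
      have : (row.take w).count 'O' < row.count 'O' := by omega
      exact_mod_cast this
    · have : (r0 : Int) < (rowsL.length : Int) := by exact_mod_cast hr0
      omega
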